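-- pv_equiv track=rewrite | github.com/Dunce132/HackHayward2026 | kevin/app.py | _compact_weekday_text
-- ===== SOURCE A (Python) =====
-- from typing import Any, Dict, List, Optional
--
-- _DAY_ABBR = {
--     "Monday": "Mon",
--     "Tuesday": "Tue",
--     "Wednesday": "Wed",
--     "Thursday": "Thu",
--     "Friday": "Fri",
--     "Saturday": "Sat",
--     "Sunday": "Sun",
-- }
--
-- def _compact_weekday_text(lines: List[str]) -> str:
--     """Shorten Google weekday_text: group adjacent days with identical hours."""
--     if not lines:
--         return ""
--     parsed: List[tuple] = []
--     for line in lines: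
--         s = str(line).strip()
--         if not s:
--             continue
--         if ": " in s:
--             day, rest = s.split(": ", 1)
--             parsed.append((day.strip(), rest.strip()))
--         else:
--             parsed.append(("", s))
--     if not parsed:
--         return ""
--     chunks: List[tuple] = []
--     for day, hours in parsed:
--         if not day:
--             continue
--         if chunks and chunks[-1][1] == hours:
--             chunks[-1][0].append(day)
--         else:
--             chunks.append(([day], hours))
--
--     def fmt_range(days: List[str]) -> str:
--         if len(days) == 1:
--             d = days[0]
--             return _DAY_ABBR.get(d, d[:3])
--         a = _DAY_ABBR.get(days[0], days[0][:3])
--         b = _DAY_ABBR.get(days[-1], days[-1][:3])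
--         return f"{a}–{b}"
--
--     parts = [f"{fmt_range(days)}: {hours}" for days, hours in chunks]
--     return " · ".join(parts)
-- ===== SOURCE B (Python) =====
-- _DAY_ABBR = {
--     "Monday": "Mon",
--     "Tuesday": "Tue",
--     "Wednesday": "Wed",
--     "Thursday": "Thu",
--     "Friday": "Fri",
--     "Saturday": "Sat",
--     "Sunday": "Sun",
-- }
--
--
-- def _parse(line):
--     """Parse one line into a (day, hours) pair, or None for a blank line."""
--     s = str(line).strip()
--     if not s:
--         return None
--     if ": " in s:
--         day, rest = s.split(": ", 1)
--         return (day.strip(), rest.strip())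
--     return ("", s)
--
--
-- def _abbr(d):
--     return _DAY_ABBR.get(d, d[:3])
--
--
-- def _fmt(days):
--     if len(days) == 1:
--         return _abbr(days[0])
--     return f"{_abbr(days[0])}\u2013{_abbr(days[-1])}"
--
--
-- def _run_len(h, pairs):
--     """Length of the leading run of pairs whose hours equal h."""
--     n = 0
--     for _, hh in pairs:
--         if hh != h:
--             break
--         n += 1
--     return n
--
--
-- def _runs(pairs):
--     """Split pairs into maximal runs of equal hours: list of (days, hours)."""
--     runs = []
--     while pairs:
--         d, h = pairs[0]
--         k = _run_len(h, pairs[1:])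
--         runs.append(([d] + [x for x, _ in pairs[1:k + 1]], h))
--         pairs = pairs[k + 1:]
--     return runs
--
--
-- def _compact_weekday_text(lines):
--     parsed = [p for p in (_parse(line) for line in lines) if p is not None]
--     if not parsed:
--         return ""
--     valid = [p for p in parsed if p[0]]
--     return " \u00b7 ".join(f"{_fmt(days)}: {hours}" for days, hours in _runs(valid))
-- ===== Notes on version B (the rewrite author's own statement) =====
-- stated objective: alternative
-- what changed: A builds chunks by mutating the last accumulator entry while skipping empty-day pairs inline; B parses via an Option-returning helper with filterMap, filters the valid pairs once, then splits them into maximal equal-hours runs by pure run-length extraction and formats each run with a comprehension.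
import Mathlib
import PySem

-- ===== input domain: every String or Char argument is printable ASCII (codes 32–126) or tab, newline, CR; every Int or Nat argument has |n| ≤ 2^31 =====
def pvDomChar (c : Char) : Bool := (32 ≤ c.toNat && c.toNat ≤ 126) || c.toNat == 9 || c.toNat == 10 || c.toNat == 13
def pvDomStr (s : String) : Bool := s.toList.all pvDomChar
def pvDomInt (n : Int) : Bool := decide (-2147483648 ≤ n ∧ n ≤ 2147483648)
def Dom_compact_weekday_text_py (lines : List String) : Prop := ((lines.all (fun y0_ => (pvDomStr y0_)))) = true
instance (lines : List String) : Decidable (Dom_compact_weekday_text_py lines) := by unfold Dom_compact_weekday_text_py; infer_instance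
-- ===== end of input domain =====

-- B replaces A's stateful append-to-last-chunk accumulator by pure run extraction
-- (filter the valid pairs first, then split off maximal equal-hours runs); objective: alternative.

-- ===== PORT A =====
def dayAbbrA : PySem.Dict String String := PySem.Dict.ofList
  [("Monday", "Mon"), ("Tuesday", "Tue"), ("Wednesday", "Wed"), ("Thursday", "Thu"),
   ("Friday", "Fri"), ("Saturday", "Sat"), ("Sunday", "Sun")]

-- one iteration of A's parsing loop
def stepA (acc : List (String × String)) (line : String) : List (String × String) :=
  let s := PySem.Str.strip line
  if s = "" then acc
  else if PySem.Str.isIn ": " s then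
    match PySem.Str.splitMax? s ": " 1 with
    | some [day, rest] => acc ++ [(PySem.Str.strip day, PySem.Str.strip rest)]
    | _ => acc  -- unreachable: ": " is a non-empty separator occurring in s, so the split has exactly 2 parts
  else acc ++ [("", s)]

-- one iteration of A's chunk-building loop (the tuple's day-list mutation becomes replacing the last chunk)
def chunkStepA (cs : List (List String × String)) (p : String × String) : List (List String × String) :=
  if p.1 = "" then cs
  else
    match cs.getLast? with
    | some c => if c.2 = p.2 then cs.dropLast ++ [(c.1 ++ [p.1], p.2)] else cs ++ [([p.1], p.2)]
    | none => cs ++ [([p.1], p.2)]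

-- A's nested fmt_range (days is never empty at the call sites; headD/getLastD "" only totalize days[0]/days[-1])
def fmtRangeA (days : List String) : String :=
  if days.length = 1 then
    let d := days.headD ""
    dayAbbrA.getD d (PySem.Str.slice d none (some 3))
  else
    let a := dayAbbrA.getD (days.headD "") (PySem.Str.slice (days.headD "") none (some 3))
    let b := dayAbbrA.getD (days.getLastD "") (PySem.Str.slice (days.getLastD "") none (some 3))
    a ++ "–" ++ b

def compact_weekday_text_py (lines : List String) : String :=
  if lines = [] then ""
  else
    let parsed := lines.foldl stepA []
    if parsed = [] then ""
    else
      let chunks := parsed.foldl chunkStepA []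
      PySem.Str.join " · " (chunks.map (fun c => fmtRangeA c.1 ++ ": " ++ c.2))

-- ===== PORT B =====
def dayAbbrB : PySem.Dict String String := PySem.Dict.ofList
  [("Monday", "Mon"), ("Tuesday", "Tue"), ("Wednesday", "Wed"), ("Thursday", "Thu"),
   ("Friday", "Fri"), ("Saturday", "Sat"), ("Sunday", "Sun")]

def parseB (line : String) : Option (String × String) :=
  let s := PySem.Str.strip line
  if s = "" then none
  else if PySem.Str.isIn ": " s then
    match PySem.Str.splitMax? s ": " 1 with
    | some [day, rest] => some (PySem.Str.strip day, PySem.Str.strip rest)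
    | _ => none  -- unreachable: ": " is a non-empty separator occurring in s
  else some ("", s)

def abbrB (d : String) : String := dayAbbrB.getD d (PySem.Str.slice d none (some 3))

def fmtB (days : List String) : String :=
  if days.length = 1 then abbrB (days.headD "")
  else abbrB (days.headD "") ++ "–" ++ abbrB (days.getLastD "")

-- length of the leading run of pairs whose hours equal h (Source B's _run_len)
def runLenB (h : String) : List (String × String) → Nat
  | [] => 0
  | p :: rest => if p.2 = h then runLenB h rest + 1 else 0

-- Source B's _runs: peel off maximal equal-hours runs
def runsB (pairs : List (String × String)) : List (List String × String) :=
  match pairs with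
  | [] => []
  | (d, h) :: rest =>
    let k := runLenB h rest
    (d :: (rest.take k).map (·.1), h) :: runsB (rest.drop k)
termination_by pairs.length
decreasing_by simp

def compact_weekday_text_py_alt (lines : List String) : String :=
  let parsed := lines.filterMap parseB
  if parsed = [] then ""
  else
    let valid := parsed.filter (fun p => p.1 != "")
    PySem.Str.join " · " ((runsB valid).map (fun c => fmtB c.1 ++ ": " ++ c.2))

-- ===== PRECONDITION & SPEC =====
def Spec_compact_weekday_text_py (lines : List String) (out : String) : Prop := out = compact_weekday_text_py_alt lines
instance (lines : List String) (out : String) : Decidable (Spec_compact_weekday_text_py lines out) := by unfold Spec_compact_weekday_text_py; infer_instance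

-- ===== CLAIM (what is proved, stated in full; the proofs are below) =====
def Claim_equal_compact_weekday_text_py : Prop := ∀ (lines : List String), Dom_compact_weekday_text_py lines → Spec_compact_weekday_text_py lines (compact_weekday_text_py lines)

-- ===== LEMMAS AND PROOFS =====

-- A's parsing step contributes exactly what B's parseB yields
theorem runsB_nil : runsB [] = [] := by rw [runsB.eq_def]

theorem runsB_cons (d h : String) (rest : List (String × String)) :
    runsB ((d, h) :: rest) =
      (d :: (rest.take (runLenB h rest)).map (·.1), h) :: runsB (rest.drop (runLenB h rest)) := by
  rw [runsB.eq_def]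

theorem stepA_eq (acc : List (String × String)) (line : String) :
    stepA acc line = acc ++ (parseB line).toList := by
  unfold stepA parseB
  dsimp only
  split_ifs with h1 h2
  · simp
  · rcases hsp : PySem.Str.splitMax? (PySem.Str.strip line) ": " 1 with _ | ls
    · simp
    · rcases ls with _ | ⟨d, _ | ⟨r, _ | _⟩⟩ <;> simp
  · simp

theorem foldl_stepA (lines : List String) (acc : List (String × String)) :
    lines.foldl stepA acc = acc ++ lines.filterMap parseB := by
  induction lines generalizing acc with
  | nil => simp
  | cons l ls ih =>
    simp only [List.foldl_cons, ih, stepA_eq, List.filterMap_cons]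
    cases parseB l <;> simp

-- chunkStepA skips pairs with empty day, so folding over parsed = folding over the filtered list
theorem foldl_chunkStepA_filter (ps : List (String × String)) (cs : List (List String × String)) :
    ps.foldl chunkStepA cs = (ps.filter (fun p => p.1 != "")).foldl chunkStepA cs := by
  induction ps generalizing cs with
  | nil => rfl
  | cons p rest ih =>
    by_cases hp : p.1 = ""
    · simp [hp, ih, chunkStepA]
    · simp [hp, ih]

-- the key invariant: with a last open chunk (ds, h), A's fold extends it by the leading h-run and
-- then produces exactly B's runs of the remainder
theorem foldl_chunkStepA_run (l : List (String × String)) (hne : ∀ p ∈ l, p.1 ≠ "")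
    (cs : List (List String × String)) (ds : List String) (h : String) :
    l.foldl chunkStepA (cs ++ [(ds, h)]) =
      cs ++ (ds ++ (l.take (runLenB h l)).map (·.1), h) :: runsB (l.drop (runLenB h l)) := by
  induction l generalizing cs ds h with
  | nil => simp [runLenB, runsB_nil]
  | cons p rest ih =>
    obtain ⟨d, h'⟩ := p
    have hd : d ≠ "" := hne (d, h') (by simp)
    have hrest : ∀ q ∈ rest, q.1 ≠ "" := fun q hq => hne q (by simp [hq])
    by_cases hh : h' = h
    · subst hh
      have step : chunkStepA (cs ++ [(ds, h')]) (d, h') = cs ++ [(ds ++ [d], h')] := by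
        simp [chunkStepA, hd]
      rw [List.foldl_cons, step, ih hrest]
      simp [runLenB, List.append_assoc]
    · have step : chunkStepA (cs ++ [(ds, h)]) (d, h') = (cs ++ [(ds, h)]) ++ [([d], h')] := by
        simp [chunkStepA, hd, Ne.symm hh]
      rw [List.foldl_cons, step, ih hrest]
      simp [runLenB, hh, runsB_cons]

theorem foldl_chunkStepA_eq_runsB (l : List (String × String)) (hne : ∀ p ∈ l, p.1 ≠ "") :
    l.foldl chunkStepA [] = runsB l := by
  cases l with
  | nil => simp [runsB_nil]
  | cons p rest =>
    obtain ⟨d, h⟩ := p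
    have hd : d ≠ "" := hne (d, h) (by simp)
    have hrest : ∀ q ∈ rest, q.1 ≠ "" := fun q hq => hne q (by simp [hq])
    have step : chunkStepA [] (d, h) = [] ++ [([d], h)] := by simp [chunkStepA, hd]
    rw [List.foldl_cons, step, foldl_chunkStepA_run rest hrest]
    simp [runsB_cons]

-- ===== VERDICT (by name: the statement is the Claim_ definition above) =====
theorem compact_weekday_text_py_spec : Claim_equal_compact_weekday_text_py := by
  intro lines _
  unfold Spec_compact_weekday_text_py compact_weekday_text_py compact_weekday_text_py_alt
  by_cases hl : lines = []
  · subst hl; simp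
  · rw [if_neg hl, foldl_stepA]
    simp only [List.nil_append]
    by_cases hp : lines.filterMap parseB = []
    · simp [hp]
    · rw [if_neg hp, if_neg hp, foldl_chunkStepA_filter, foldl_chunkStepA_eq_runsB]
      · rfl
      · intro p hpmem
        have := List.mem_filter.1 hpmem
        simpa using this.2
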